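-- pv_equiv track=rewrite | github.com/EunwooSong/KAN-f | KAN-f(new)/eng_noise/eng_noise.py | modify_vowel_consonant_end_le
-- ===== SOURCE A (Python) =====
-- vowel = 'aeiou'
--
-- def modify_vowel_consonant_end_le(word):
--     """
--     모음과 단어 끝의 'le' 사이에 낀 'd' 또는 't'를 'r'로 발음 변화시키는 함수입니다.
--
--     Parameters:
--     word (str): 변환할 단어
--
--     Returns:
--     str: 발음 변화된 단어
--
--     Examples:
--     >>> modify_vowel_consonant_end_le('little')
--     'lirrle'
--     """
--     modified_word = ''
--     for i in range(len(word)):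
--         if word[i].isalpha():
--             if i < len(word) - 2 and word[i].lower() in vowel:
--                 if word[i+1].lower() in 'dt' and word[i+2:].lower() == 'le':
--                     modified_word += 'r'
--                     continue
--             if i < len(word) - 1 and word[i].lower() in 'dt' and word[i+1:].lower() == 'le':
--                 modified_word += 'r'
--             else:
--                 modified_word += word[i]
--         else:
--             modified_word += word[i]
--     return modified_word
-- ===== SOURCE B (Python) =====
-- def modify_vowel_consonant_end_le(word):
--     # Suffix rewrite instead of a per-character scan: the loop in A only ever
--     # changes the tail '<vowel?><d|t>le' (case-insensitively), so inspect the
--     # last four characters once and rebuild the suffix.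
--     w = word.lower()
--     if len(word) >= 3 and w.endswith('le') and w[-3] in 'dt':
--         if len(word) >= 4 and w[-4] in 'aeiou':
--             return word[:-4] + 'rr' + word[-2:]
--         return word[:-3] + 'r' + word[-2:]
--     return word
-- ===== Notes on version B (the rewrite author's own statement) =====
-- stated objective: faster
-- what changed: Replaces A's per-character index loop with slice conditions (which build the output one character at a time and re-lowercase the remaining suffix at every position) by a single O(1)-comparisons inspection of the last four characters followed by one slice-based rebuild of the suffix.
import Mathlib
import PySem

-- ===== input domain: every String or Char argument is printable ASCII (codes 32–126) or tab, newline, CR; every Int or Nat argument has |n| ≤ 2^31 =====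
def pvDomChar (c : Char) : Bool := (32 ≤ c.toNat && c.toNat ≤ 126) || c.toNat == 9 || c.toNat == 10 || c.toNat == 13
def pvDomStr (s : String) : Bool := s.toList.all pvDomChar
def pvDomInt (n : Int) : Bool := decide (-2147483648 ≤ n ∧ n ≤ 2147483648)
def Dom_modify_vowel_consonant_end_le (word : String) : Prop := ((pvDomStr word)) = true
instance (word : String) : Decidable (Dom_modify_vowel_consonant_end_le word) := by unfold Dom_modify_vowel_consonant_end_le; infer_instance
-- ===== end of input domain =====

-- B rewrites only the word's tail by direct slicing instead of A's per-character index loop.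

-- ===== PORT A =====
-- module constant: vowel = 'aeiou'
def pvVowel : List Char := ['a', 'e', 'i', 'o', 'u']

-- loop body of A; each branch appends exactly one character to modified_word.
-- 'x in "dt"' for a single character x is character membership; 'i < len(word) - 2'
-- coincides with Nat truncated subtraction since i ≥ 0. The 'continue' after the
-- vowel branch means control otherwise falls through to the second check, which
-- therefore appears in both remaining paths.
-- word[i] (evaluated afresh at each use, as in the Python conditions)
def pvC (cs : List Char) (i : Nat) : Char := PySem.List.pyGetD cs (i : Int) ' '

def pvStepA (cs : List Char) (acc : List Char) (i : Nat) : List Char :=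
  if PySem.Chars.isalpha (pvC cs i) then
    if decide (i < cs.length - 2) && pvVowel.contains (PySem.Chars.lowerChar (pvC cs i)) then
      if (['d','t'].contains (PySem.Chars.lowerChar (PySem.List.pyGetD cs ((i : Int) + 1) ' '))) &&
         (PySem.Chars.lower (PySem.List.slice cs (some ((i : Int) + 2)) none) == ['l','e']) then
        acc ++ ['r']      -- continue
      else if decide (i < cs.length - 1) && (['d','t'].contains (PySem.Chars.lowerChar (pvC cs i))) &&
              (PySem.Chars.lower (PySem.List.slice cs (some ((i : Int) + 1)) none) == ['l','e']) then
        acc ++ ['r']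
      else acc ++ [(pvC cs i)]
    else if decide (i < cs.length - 1) && (['d','t'].contains (PySem.Chars.lowerChar (pvC cs i))) &&
            (PySem.Chars.lower (PySem.List.slice cs (some ((i : Int) + 1)) none) == ['l','e']) then
      acc ++ ['r']
    else acc ++ [(pvC cs i)]
  else acc ++ [(pvC cs i)]

def modify_vowel_consonant_end_le (word : String) : String :=
  String.ofList ((List.range word.toList.length).foldl (pvStepA word.toList) [])

-- ===== PORT B =====
def modify_vowel_consonant_end_le_alt (word : String) : String :=
  let cs := word.toList
  let w := PySem.Chars.lower cs                                  -- w = word.lower()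
  if decide (3 ≤ cs.length) && PySem.Chars.endswith w ['l','e'] &&
     (['d','t'].contains (PySem.List.pyGetD w (-3) ' ')) then    -- w[-3] in 'dt' (in range: len ≥ 3)
    if decide (4 ≤ cs.length) && pvVowel.contains (PySem.List.pyGetD w (-4) ' ') then
      String.ofList (PySem.List.slice cs none (some (-4)) ++ ['r','r'] ++ PySem.List.slice cs (some (-2)) none)
    else
      String.ofList (PySem.List.slice cs none (some (-3)) ++ ['r'] ++ PySem.List.slice cs (some (-2)) none)
  else word

-- ===== PRECONDITION & SPEC =====
def Spec_modify_vowel_consonant_end_le (word : String) (out : String) : Prop := out = modify_vowel_consonant_end_le_alt word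
instance (word : String) (out : String) : Decidable (Spec_modify_vowel_consonant_end_le word out) := by unfold Spec_modify_vowel_consonant_end_le; infer_instance

-- ===== CLAIM (what is proved, stated in full; the proofs are below) =====
def Claim_equal_modify_vowel_consonant_end_le : Prop := ∀ (word : String), Dom_modify_vowel_consonant_end_le word → Spec_modify_vowel_consonant_end_le word (modify_vowel_consonant_end_le word)

-- ===== LEMMAS AND PROOFS =====

-- the single character A's loop body appends at index i
def pvCharA (cs : List Char) (i : Nat) : Char :=
  if PySem.Chars.isalpha (pvC cs i) then
    if decide (i < cs.length - 2) && pvVowel.contains (PySem.Chars.lowerChar (pvC cs i)) then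
      if (['d','t'].contains (PySem.Chars.lowerChar (PySem.List.pyGetD cs ((i : Int) + 1) ' '))) &&
         (PySem.Chars.lower (PySem.List.slice cs (some ((i : Int) + 2)) none) == ['l','e']) then
        'r'
      else if decide (i < cs.length - 1) && (['d','t'].contains (PySem.Chars.lowerChar (pvC cs i))) &&
              (PySem.Chars.lower (PySem.List.slice cs (some ((i : Int) + 1)) none) == ['l','e']) then
        'r'
      else (pvC cs i)
    else if decide (i < cs.length - 1) && (['d','t'].contains (PySem.Chars.lowerChar (pvC cs i))) &&
            (PySem.Chars.lower (PySem.List.slice cs (some ((i : Int) + 1)) none) == ['l','e']) then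
      'r'
    else (pvC cs i)
  else (pvC cs i)

theorem pvStepA_eq (cs acc : List Char) (i : Nat) :
    pvStepA cs acc i = acc ++ [pvCharA cs i] := by
  unfold pvStepA pvCharA
  split_ifs <;> rfl

theorem pvFoldA (cs : List Char) (l : List Nat) (acc : List Char) :
    l.foldl (pvStepA cs) acc = acc ++ l.map (pvCharA cs) := by
  induction l generalizing acc with
  | nil => simp
  | cons x xs ih => simp [List.foldl_cons, pvStepA_eq, ih]

theorem pvPortA (word : String) :
    modify_vowel_consonant_end_le word =
      String.ofList ((List.range word.toList.length).map (pvCharA word.toList)) := by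
  unfold modify_vowel_consonant_end_le
  rw [pvFoldA]; rfl

-- character-level facts
theorem pv_alpha_of_lower_dt (c : Char)
    (h : PySem.Chars.lowerChar c = 'd' ∨ PySem.Chars.lowerChar c = 't') :
    PySem.Chars.isalpha c = true := by
  by_cases hu : PySem.Chars.isupper c = true
  · simp [PySem.Chars.isalpha, hu]
  · rcases h with h | h <;>
    · rw [PySem.Chars.lowerChar, if_neg hu] at h
      subst h; decide

theorem pv_dt_not_vowel (c : Char)
    (h : PySem.Chars.lowerChar c = 'd' ∨ PySem.Chars.lowerChar c = 't') :
    pvVowel.contains (PySem.Chars.lowerChar c) = false := by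
  rcases h with h | h <;> rw [h] <;> decide

-- accessors
theorem pv_pyGetD_nat {α : Type} (l : List α) (i : Nat) (d : α) (h : i < l.length) :
    PySem.List.pyGetD l (i : Int) d = l[i] := by
  simp [PySem.List.pyGetD, h]

theorem pv_pyGetD_neg {α : Type} (l : List α) (k : Nat) (d : α)
    (h0 : 0 < k) (hk : k ≤ l.length) :
    PySem.List.pyGetD l (-(k : Int)) d = l.getD (l.length - k) d := by
  have h1 : PySem.List.pyIdx? l.length (-(k : Int)) = some (l.length - k) := by
    simp only [PySem.List.pyIdx?]
    rw [if_neg (by omega), if_pos (by omega)]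
    congr 1
    omega
  simp [PySem.List.pyGetD, PySem.List.pyGet?, h1, List.getD_eq_getElem?_getD]

-- the tail test word[k:].lower() == 'le'
theorem pv_lecond_iff (cs : List Char) (k : Nat) :
    ((PySem.Chars.lower (PySem.List.slice cs (some (k : Int)) none) == ['l','e']) = true) ↔
      (PySem.Chars.lower cs).drop k = ['l','e'] := by
  rw [PySem.List.slice_from cs (by positivity)]
  simp [PySem.Chars.lower, List.map_drop]

theorem pv_lecond_len {w : List Char} {k : Nat} (h : w.drop k = ['l','e']) (hk : k ≤ w.length) :
    k + 2 = w.length := by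
  have := congrArg List.length h
  simp [List.length_drop] at this
  omega

-- pvCharA is the identity at indices where no rewrite can fire
theorem pvCharA_id (cs : List Char) (i : Nat) (hi : i < cs.length)
    (hA : ¬ (i + 4 = cs.length ∧
             (PySem.Chars.lower cs).getD (cs.length - 4) ' ' ∈ pvVowel ∧
             ((PySem.Chars.lower cs).getD (cs.length - 3) ' ' = 'd' ∨
              (PySem.Chars.lower cs).getD (cs.length - 3) ' ' = 't') ∧
             (PySem.Chars.lower cs).drop (cs.length - 2) = ['l','e']))
    (hB : ¬ (i + 3 = cs.length ∧
             ((PySem.Chars.lower cs).getD (cs.length - 3) ' ' = 'd' ∨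
              (PySem.Chars.lower cs).getD (cs.length - 3) ' ' = 't') ∧
             (PySem.Chars.lower cs).drop (cs.length - 2) = ['l','e'])) :
    pvCharA cs i = cs[i] := by
  have hw : (PySem.Chars.lower cs).length = cs.length := by
    simp [PySem.Chars.lower]
  have hwget : ∀ j (hj : j < cs.length),
      (PySem.Chars.lower cs).getD j ' ' = PySem.Chars.lowerChar cs[j] := by
    intro j hj
    rw [List.getD_eq_getElem _ _ (by omega : j < (PySem.Chars.lower cs).length)]
    simp [PySem.Chars.lower]
  unfold pvCharA
  rw [show pvC cs i = cs[i] from pv_pyGetD_nat cs i ' ' hi]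
  split_ifs with halpha hvguard hvinner <;> try rfl
  · -- vowel branch fired: contradiction with hA
    exfalso
    simp only [Bool.and_eq_true, decide_eq_true_eq] at hvguard hvinner
    obtain ⟨hi2, hv⟩ := hvguard
    obtain ⟨hdt, hle⟩ := hvinner
    have hki : ((i : Int) + 2) = ((i + 2 : Nat) : Int) := by push_cast; ring
    rw [hki] at hle
    have hle' := (pv_lecond_iff cs (i + 2)).mp hle
    have hlen := pv_lecond_len hle' (by omega)
    rw [hw] at hlen
    have hi4 : i + 4 = cs.length := by omega
    apply hA
    refine ⟨hi4, ?_, ?_, by rwa [show i + 2 = cs.length - 2 by omega] at hle'⟩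
    · rw [hwget (cs.length - 4) (by omega)]
      simp only [show cs.length - 4 = i from by omega]
      simpa [List.contains_iff_mem] using hv
    · rw [hwget (cs.length - 3) (by omega)]
      have hi1 : ((i : Int) + 1) = ((i + 1 : Nat) : Int) := by push_cast; ring
      rw [hi1, pv_pyGetD_nat cs (i + 1) ' ' (by omega)] at hdt
      simp only [show cs.length - 3 = i + 1 from by omega]
      simpa [List.contains_iff_mem, List.mem_cons] using hdt
  all_goals
    -- second branch fired: contradiction with hB
    exfalso
    rename_i hsec
    simp only [Bool.and_eq_true, decide_eq_true_eq] at hsec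
    obtain ⟨⟨hi1, hdt⟩, hle⟩ := hsec
    have hki : ((i : Int) + 1) = ((i + 1 : Nat) : Int) := by push_cast; ring
    rw [hki] at hle
    have hle' := (pv_lecond_iff cs (i + 1)).mp hle
    have hlen := pv_lecond_len hle' (by omega)
    rw [hw] at hlen
    apply hB
    have hwget3 : ∀ j (hj : j < cs.length),
        (PySem.Chars.lower cs).getD j ' ' = PySem.Chars.lowerChar cs[j] := hwget
    refine ⟨by omega, ?_, by rwa [show i + 1 = cs.length - 2 from by omega] at hle'⟩
    rw [hwget3 (cs.length - 3) (by omega)]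
    simp only [show cs.length - 3 = i from by omega]
    simpa [List.contains_iff_mem, List.mem_cons, pvC, pv_pyGetD_nat cs i ' ' hi] using hdt

-- pvCharA produces 'r' at the d/t position of a matching tail
theorem pvCharA_r_dt (cs : List Char) (h3 : 3 ≤ cs.length)
    (hdt : (PySem.Chars.lower cs).getD (cs.length - 3) ' ' = 'd' ∨
           (PySem.Chars.lower cs).getD (cs.length - 3) ' ' = 't')
    (hle : (PySem.Chars.lower cs).drop (cs.length - 2) = ['l','e']) :
    pvCharA cs (cs.length - 3) = 'r' := by
  have hi : cs.length - 3 < cs.length := by omega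
  have hwget : (PySem.Chars.lower cs).getD (cs.length - 3) ' ' =
      PySem.Chars.lowerChar cs[cs.length - 3] := by
    rw [List.getD_eq_getElem _ _ (by simp [PySem.Chars.lower]; omega)]
    simp [PySem.Chars.lower]
  rw [hwget] at hdt
  unfold pvCharA
  rw [show pvC cs (cs.length - 3) = cs[cs.length - 3] from pv_pyGetD_nat cs (cs.length - 3) ' ' hi]
  rw [if_pos (pv_alpha_of_lower_dt _ hdt)]
  rw [if_neg (by
    intro hcond
    rw [Bool.and_eq_true, pv_dt_not_vowel _ hdt] at hcond
    exact absurd hcond.2 (by simp))]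
  have hki : ((cs.length - 3 : Nat) : Int) + 1 = ((cs.length - 2 : Nat) : Int) := by
    push_cast [h3]; omega
  rw [if_pos]
  simp only [Bool.and_eq_true, decide_eq_true_eq]
  refine ⟨⟨by omega, by simpa [List.contains_iff_mem, List.mem_cons] using hdt⟩, ?_⟩
  rw [hki, pv_lecond_iff cs (cs.length - 2)]
  exact hle

-- pvCharA produces 'r' at the vowel position of a matching tail
theorem pvCharA_r_vowel (cs : List Char) (h4 : 4 ≤ cs.length)
    (hv : (PySem.Chars.lower cs).getD (cs.length - 4) ' ' ∈ pvVowel)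
    (hdt : (PySem.Chars.lower cs).getD (cs.length - 3) ' ' = 'd' ∨
           (PySem.Chars.lower cs).getD (cs.length - 3) ' ' = 't')
    (hle : (PySem.Chars.lower cs).drop (cs.length - 2) = ['l','e']) :
    pvCharA cs (cs.length - 4) = 'r' := by
  have hi : cs.length - 4 < cs.length := by omega
  have hwget : ∀ j (hj : j < cs.length),
      (PySem.Chars.lower cs).getD j ' ' = PySem.Chars.lowerChar cs[j] := by
    intro j hj
    rw [List.getD_eq_getElem _ _ (by simp [PySem.Chars.lower]; omega)]
    simp [PySem.Chars.lower]
  rw [hwget _ hi] at hv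
  rw [hwget _ (by omega)] at hdt
  have halpha : PySem.Chars.isalpha cs[cs.length - 4] = true := by
    -- a character whose lowercase form is a vowel letter is alphabetic
    rcases List.mem_cons.mp hv with h | h
    · by_cases hu : PySem.Chars.isupper cs[cs.length - 4] = true
      · simp [PySem.Chars.isalpha, hu]
      · rw [PySem.Chars.lowerChar, if_neg hu] at h; rw [h]; decide
    · rcases List.mem_cons.mp h with h | h
      · by_cases hu : PySem.Chars.isupper cs[cs.length - 4] = true
        · simp [PySem.Chars.isalpha, hu]
        · rw [PySem.Chars.lowerChar, if_neg hu] at h; rw [h]; decide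
      · rcases List.mem_cons.mp h with h | h
        · by_cases hu : PySem.Chars.isupper cs[cs.length - 4] = true
          · simp [PySem.Chars.isalpha, hu]
          · rw [PySem.Chars.lowerChar, if_neg hu] at h; rw [h]; decide
        · rcases List.mem_cons.mp h with h | h
          · by_cases hu : PySem.Chars.isupper cs[cs.length - 4] = true
            · simp [PySem.Chars.isalpha, hu]
            · rw [PySem.Chars.lowerChar, if_neg hu] at h; rw [h]; decide
          · rcases List.mem_cons.mp h with h | h
            · by_cases hu : PySem.Chars.isupper cs[cs.length - 4] = true
              · simp [PySem.Chars.isalpha, hu]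
              · rw [PySem.Chars.lowerChar, if_neg hu] at h; rw [h]; decide
            · simp at h
  unfold pvCharA
  rw [show pvC cs (cs.length - 4) = cs[cs.length - 4] from pv_pyGetD_nat cs (cs.length - 4) ' ' hi]
  rw [if_pos halpha]
  have hvg : (decide (cs.length - 4 < cs.length - 2) &&
      pvVowel.contains (PySem.Chars.lowerChar cs[cs.length - 4])) = true := by
    simp only [Bool.and_eq_true, decide_eq_true_eq]
    exact ⟨by omega, by simpa [List.contains_iff_mem] using hv⟩
  rw [if_pos hvg]
  rw [if_pos]
  simp only [Bool.and_eq_true]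
  constructor
  · have hki : ((cs.length - 4 : Nat) : Int) + 1 = ((cs.length - 3 : Nat) : Int) := by
      push_cast [h4]; omega
    rw [hki, pv_pyGetD_nat cs (cs.length - 3) ' ' (by omega)]
    simpa [List.contains_iff_mem, List.mem_cons] using hdt
  · have hki : ((cs.length - 4 : Nat) : Int) + 2 = ((cs.length - 2 : Nat) : Int) := by
      push_cast [h4]; omega
    rw [hki]
    rw [pv_lecond_iff cs (cs.length - 2)]
    exact hle

-- B's negative slices, in closed form
theorem pv_slice_to_neg {α : Type} (l : List α) (k : Nat) (h0 : 0 < k) (hk : k ≤ l.length) :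
    PySem.List.slice l none (some (-(k : Int))) = l.take (l.length - k) := by
  simp only [PySem.List.slice, PySem.List.clampIdx]
  rw [if_pos (by omega), if_neg (by omega)]
  simp only [Nat.sub_zero, List.drop_zero]
  congr 1
  omega

theorem pv_slice_from_neg {α : Type} (l : List α) (k : Nat) (h0 : 0 < k) (hk : k ≤ l.length) :
    PySem.List.slice l (some (-(k : Int))) none = l.drop (l.length - k) := by
  simp only [PySem.List.slice, PySem.List.clampIdx]
  rw [if_pos (by omega), if_neg (by omega)]
  have : ((l.length : Int) + -(k : Int)).toNat = l.length - k := by omega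
  rw [this]
  exact List.take_of_length_le (by simp)

-- endswith 'le' on w (length = cs.length) ↔ the dropped tail is ['l','e']
theorem pv_endswith_iff (cs : List Char) :
    PySem.Chars.endswith (PySem.Chars.lower cs) ['l','e'] = true ↔
      (PySem.Chars.lower cs).drop (cs.length - 2) = ['l','e'] := by
  rw [PySem.Chars.endswith_iff, List.suffix_iff_eq_drop]
  have hw : (PySem.Chars.lower cs).length = cs.length := by simp [PySem.Chars.lower]
  rw [hw]
  exact ⟨fun h => h.symm, fun h => h.symm⟩

-- main list-level equalities
theorem pvList_id (cs : List Char)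
    (h1 : ¬ (3 ≤ cs.length ∧
             ((PySem.Chars.lower cs).getD (cs.length - 3) ' ' = 'd' ∨
              (PySem.Chars.lower cs).getD (cs.length - 3) ' ' = 't') ∧
             (PySem.Chars.lower cs).drop (cs.length - 2) = ['l','e'])) :
    (List.range cs.length).map (pvCharA cs) = cs := by
  apply List.ext_getElem (by simp)
  intro i hi1 hi2
  simp only [List.getElem_map, List.getElem_range]
  apply pvCharA_id cs i (by simpa using hi2)
  · rintro ⟨ha, -, hdt, hle⟩
    exact h1 ⟨by omega, hdt, hle⟩
  · rintro ⟨ha, hdt, hle⟩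
    exact h1 ⟨by omega, hdt, hle⟩

theorem pvList_dt (cs : List Char) (h3 : 3 ≤ cs.length)
    (hdt : (PySem.Chars.lower cs).getD (cs.length - 3) ' ' = 'd' ∨
           (PySem.Chars.lower cs).getD (cs.length - 3) ' ' = 't')
    (hle : (PySem.Chars.lower cs).drop (cs.length - 2) = ['l','e'])
    (hnv : ¬ (4 ≤ cs.length ∧ (PySem.Chars.lower cs).getD (cs.length - 4) ' ' ∈ pvVowel)) :
    (List.range cs.length).map (pvCharA cs) =
      cs.take (cs.length - 3) ++ ['r'] ++ cs.drop (cs.length - 2) := by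
  apply List.ext_getElem (by simp; omega)
  intro i hi1 hi2
  simp only [List.length_map, List.length_range] at hi1
  simp only [List.getElem_map, List.getElem_range]
  have htk : (cs.take (cs.length - 3)).length = cs.length - 3 := by rw [List.length_take]; omega
  by_cases hlt : i < cs.length - 3
  · rw [pvCharA_id cs i (by omega)
      (by rintro ⟨ha, hv, -, -⟩; exact hnv ⟨by omega, hv⟩)
      (by rintro ⟨ha, -, -⟩; omega)]
    rw [List.getElem_append_left
          (by simp only [List.length_append, htk, List.length_cons, List.length_nil]; omega),
        List.getElem_append_left (by omega), List.getElem_take]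
  · by_cases heq : i = cs.length - 3
    · subst heq
      rw [pvCharA_r_dt cs h3 hdt hle]
      rw [List.getElem_append_left
            (by simp only [List.length_append, htk, List.length_cons, List.length_nil]; omega),
          List.getElem_append_right (by omega)]
      simp [htk]
    · -- i = cs.length - 2 or cs.length - 1
      rw [pvCharA_id cs i (by omega)
        (by rintro ⟨ha, -, -, -⟩; omega)
        (by rintro ⟨ha, -, -⟩; omega)]
      rw [List.getElem_append_right
            (by simp only [List.length_append, htk, List.length_cons, List.length_nil]; omega),
          List.getElem_drop]
      congr 1
      simp only [List.length_append, htk, List.length_cons, List.length_nil]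
      omega

theorem pvList_vowel (cs : List Char) (h4 : 4 ≤ cs.length)
    (hv : (PySem.Chars.lower cs).getD (cs.length - 4) ' ' ∈ pvVowel)
    (hdt : (PySem.Chars.lower cs).getD (cs.length - 3) ' ' = 'd' ∨
           (PySem.Chars.lower cs).getD (cs.length - 3) ' ' = 't')
    (hle : (PySem.Chars.lower cs).drop (cs.length - 2) = ['l','e']) :
    (List.range cs.length).map (pvCharA cs) =
      cs.take (cs.length - 4) ++ ['r','r'] ++ cs.drop (cs.length - 2) := by
  apply List.ext_getElem (by simp; omega)
  intro i hi1 hi2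
  simp only [List.length_map, List.length_range] at hi1
  simp only [List.getElem_map, List.getElem_range]
  have htk : (cs.take (cs.length - 4)).length = cs.length - 4 := by rw [List.length_take]; omega
  by_cases hlt : i < cs.length - 4
  · rw [pvCharA_id cs i (by omega)
      (by rintro ⟨ha, -, -, -⟩; omega)
      (by rintro ⟨ha, -, -⟩; omega)]
    rw [List.getElem_append_left
          (by simp only [List.length_append, htk, List.length_cons, List.length_nil]; omega),
        List.getElem_append_left (by omega), List.getElem_take]
  · by_cases heq4 : i = cs.length - 4
    · subst heq4
      rw [pvCharA_r_vowel cs h4 hv hdt hle]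
      rw [List.getElem_append_left
            (by simp only [List.length_append, htk, List.length_cons, List.length_nil]; omega),
          List.getElem_append_right (by omega)]
      simp [htk]
    · by_cases heq3 : i = cs.length - 3
      · subst heq3
        rw [pvCharA_r_dt cs (by omega) hdt hle]
        rw [List.getElem_append_left
              (by simp only [List.length_append, htk, List.length_cons, List.length_nil]; omega),
            List.getElem_append_right (by omega)]
        simp only [htk]
        simp [show cs.length - 3 - (cs.length - 4) = 1 from by omega]
      · rw [pvCharA_id cs i (by omega)
          (by rintro ⟨ha, -, -, -⟩; omega)
          (by rintro ⟨ha, -, -⟩; omega)]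
        rw [List.getElem_append_right
              (by simp only [List.length_append, htk, List.length_cons, List.length_nil]; omega),
            List.getElem_drop]
        congr 1
        simp only [List.length_append, htk, List.length_cons, List.length_nil]
        omega

-- B's Bool tests, as list-level propositions
theorem pv_b_outer (cs : List Char) :
    ((decide (3 ≤ cs.length) && PySem.Chars.endswith (PySem.Chars.lower cs) ['l','e'] &&
      (['d','t'].contains (PySem.List.pyGetD (PySem.Chars.lower cs) (-3) ' '))) = true) ↔
      (3 ≤ cs.length ∧
       ((PySem.Chars.lower cs).getD (cs.length - 3) ' ' = 'd' ∨
        (PySem.Chars.lower cs).getD (cs.length - 3) ' ' = 't') ∧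
       (PySem.Chars.lower cs).drop (cs.length - 2) = ['l','e']) := by
  have hw : (PySem.Chars.lower cs).length = cs.length := by simp [PySem.Chars.lower]
  simp only [Bool.and_eq_true, decide_eq_true_eq]
  constructor
  · rintro ⟨⟨h3, hend⟩, hcont⟩
    have hg : PySem.List.pyGetD (PySem.Chars.lower cs) (-3) ' ' =
        (PySem.Chars.lower cs).getD (cs.length - 3) ' ' := by
      rw [show (-3 : Int) = -((3 : Nat) : Int) from rfl,
          pv_pyGetD_neg _ 3 ' ' (by omega) (by omega), hw]
    rw [hg] at hcont
    exact ⟨h3, by simpa [List.contains_iff_mem, List.mem_cons] using hcont,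
           (pv_endswith_iff cs).mp hend⟩
  · rintro ⟨h3, hdt, hle⟩
    have hg : PySem.List.pyGetD (PySem.Chars.lower cs) (-3) ' ' =
        (PySem.Chars.lower cs).getD (cs.length - 3) ' ' := by
      rw [show (-3 : Int) = -((3 : Nat) : Int) from rfl,
          pv_pyGetD_neg _ 3 ' ' (by omega) (by omega), hw]
    refine ⟨⟨h3, (pv_endswith_iff cs).mpr hle⟩, ?_⟩
    rw [hg]
    simpa [List.contains_iff_mem, List.mem_cons] using hdt

theorem pv_b_inner (cs : List Char) :
    ((decide (4 ≤ cs.length) &&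
      pvVowel.contains (PySem.List.pyGetD (PySem.Chars.lower cs) (-4) ' ')) = true) ↔
      (4 ≤ cs.length ∧ (PySem.Chars.lower cs).getD (cs.length - 4) ' ' ∈ pvVowel) := by
  have hw : (PySem.Chars.lower cs).length = cs.length := by simp [PySem.Chars.lower]
  simp only [Bool.and_eq_true, decide_eq_true_eq]
  constructor
  · rintro ⟨h4, hcont⟩
    have hg : PySem.List.pyGetD (PySem.Chars.lower cs) (-4) ' ' =
        (PySem.Chars.lower cs).getD (cs.length - 4) ' ' := by
      rw [show (-4 : Int) = -((4 : Nat) : Int) from rfl,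
          pv_pyGetD_neg _ 4 ' ' (by omega) (by omega), hw]
    rw [hg] at hcont
    exact ⟨h4, by simpa [List.contains_iff_mem] using hcont⟩
  · rintro ⟨h4, hv⟩
    have hg : PySem.List.pyGetD (PySem.Chars.lower cs) (-4) ' ' =
        (PySem.Chars.lower cs).getD (cs.length - 4) ' ' := by
      rw [show (-4 : Int) = -((4 : Nat) : Int) from rfl,
          pv_pyGetD_neg _ 4 ' ' (by omega) (by omega), hw]
    rw [hg]
    exact ⟨h4, by simpa [List.contains_iff_mem] using hv⟩

-- ===== VERDICT (by name: the statement is the Claim_ definition above) =====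
theorem modify_vowel_consonant_end_le_spec : Claim_equal_modify_vowel_consonant_end_le := by
  intro word _
  unfold Spec_modify_vowel_consonant_end_le
  rw [pvPortA]
  simp only [modify_vowel_consonant_end_le_alt]
  split_ifs with h1 h2
  · -- tail '<vowel><d|t>le'
    obtain ⟨h3, hdt, hle⟩ := (pv_b_outer word.toList).mp h1
    obtain ⟨h4, hv⟩ := (pv_b_inner word.toList).mp h2
    rw [pvList_vowel word.toList h4 hv hdt hle]
    rw [show (-4 : Int) = -((4 : Nat) : Int) from rfl,
        pv_slice_to_neg word.toList 4 (by omega) (by omega)]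
    rw [show (-2 : Int) = -((2 : Nat) : Int) from rfl,
        pv_slice_from_neg word.toList 2 (by omega) (by omega)]
  · -- tail '<d|t>le', no vowel before
    obtain ⟨h3, hdt, hle⟩ := (pv_b_outer word.toList).mp h1
    rw [pvList_dt word.toList h3 hdt hle (fun hc => h2 ((pv_b_inner word.toList).mpr hc))]
    rw [show (-3 : Int) = -((3 : Nat) : Int) from rfl,
        pv_slice_to_neg word.toList 3 (by omega) (by omega)]
    rw [show (-2 : Int) = -((2 : Nat) : Int) from rfl,
        pv_slice_from_neg word.toList 2 (by omega) (by omega)]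
  · -- no matching tail: A returns the word unchanged
    rw [pvList_id word.toList (fun hc => h1 ((pv_b_outer word.toList).mpr hc))]
    simp
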